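-- pv_equiv track=rewrite | github.com/DNA-origamicon/NADOC | scripts/check_gromacs_bonds.py | parse_itp
-- ===== SOURCE A (Python) =====
-- def parse_itp(itp_text):
--     """Return (atoms_list, bonds_list).
--     atoms: list of (1-based atom_num, resnr, resname, atomname)
--     bonds: list of (atom_i, atom_j)
--     """
--     atoms, bonds = [], []
--     section = None
--     for line in itp_text.splitlines():
--         s = line.strip()
--         if not s or s.startswith(';'):
--             continue
--         if s.startswith('['):
--             section = s.strip('[] \t').lower()
--             continue
--         if section == 'atoms':
--             parts = s.split()
--             if len(parts) >= 5:
--                 atoms.append((int(parts[0]), int(parts[2]), parts[3], parts[4]))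
--         elif section == 'bonds':
--             parts = s.split()
--             if len(parts) >= 2:
--                 bonds.append((int(parts[0]), int(parts[1])))
--     return atoms, bonds
-- ===== SOURCE B (Python) =====
-- def _section_lines(lines, target):
--     """Collect the stripped data lines that fall under section `target`."""
--     out, section = [], None
--     for line in lines:
--         s = line.strip()
--         if not s or s.startswith(';'):
--             continue
--         if s.startswith('['):
--             section = s.strip('[] \t').lower()
--         elif section == target:
--             out.append(s)
--     return out
--
--
-- def parse_itp(itp_text):
--     """Return (atoms_list, bonds_list).
--     atoms: list of (1-based atom_num, resnr, resname, atomname)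
--     bonds: list of (atom_i, atom_j)
--     """
--     lines = itp_text.splitlines()
--     atoms = [(int(p[0]), int(p[2]), p[3], p[4])
--              for p in map(str.split, _section_lines(lines, 'atoms'))
--              if len(p) >= 5]
--     bonds = [(int(p[0]), int(p[1]))
--              for p in map(str.split, _section_lines(lines, 'bonds'))
--              if len(p) >= 2]
--     return atoms, bonds
-- ===== Notes on version B (the rewrite author's own statement) =====
-- stated objective: alternative
-- what changed: A's single loop that dispatches each data line on the current section into two eagerly-mutated accumulators is replaced by a generic section-line extractor run independently for 'atoms' and 'bonds', with the parsing done afterwards by declarative comprehensions over each bucket; Pre_ excludes only inputs where both programs raise ValueError (non-integer numeric fields in atoms/bonds lines).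
import Mathlib
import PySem

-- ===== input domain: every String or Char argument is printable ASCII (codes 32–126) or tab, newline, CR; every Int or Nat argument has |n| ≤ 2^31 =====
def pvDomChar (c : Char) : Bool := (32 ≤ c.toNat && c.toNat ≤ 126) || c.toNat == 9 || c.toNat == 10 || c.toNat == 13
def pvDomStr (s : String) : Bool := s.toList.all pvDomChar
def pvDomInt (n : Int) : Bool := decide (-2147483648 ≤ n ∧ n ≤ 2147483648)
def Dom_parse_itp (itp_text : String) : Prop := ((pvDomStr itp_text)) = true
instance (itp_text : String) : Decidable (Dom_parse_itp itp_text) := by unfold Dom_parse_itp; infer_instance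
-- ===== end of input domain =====

-- B replaces A's single section-dispatching loop with a generic per-section line
-- extractor run twice plus two independent parsing passes (alternative decomposition,
-- same cost); equivalence on the return value is proved for all inputs where A returns.

-- ===== PORT A =====
-- state: (current section, atoms accumulator, bonds accumulator)
def pvStepA (st : Option String × List (Int × Int × String × String) × List (Int × Int))
    (line : String) :
    Option String × List (Int × Int × String × String) × List (Int × Int) :=
  let s := PySem.Str.strip line
  if s = "" ∨ PySem.Str.startswith s ";" then st
  else if PySem.Str.startswith s "[" then
    (some (PySem.Str.lower (PySem.Str.stripChars s "[] \t")), st.2.1, st.2.2)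
  else if st.1 = some "atoms" then
    let parts := PySem.Str.split₀ s
    if 5 ≤ parts.length then
      (st.1, st.2.1 ++ [((PySem.Int.ofStr? (parts.getD 0 "")).getD 0,
                         (PySem.Int.ofStr? (parts.getD 2 "")).getD 0,
                         parts.getD 3 "", parts.getD 4 "")], st.2.2)
    else st
  else if st.1 = some "bonds" then
    let parts := PySem.Str.split₀ s
    if 2 ≤ parts.length then
      (st.1, st.2.1, st.2.2 ++ [((PySem.Int.ofStr? (parts.getD 0 "")).getD 0,
                                 (PySem.Int.ofStr? (parts.getD 1 "")).getD 0)])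
    else st
  else st

def parse_itp (itp_text : String) :
    (List (Int × Int × String × String)) × (List (Int × Int)) :=
  let st := (PySem.Str.splitlines itp_text).foldl pvStepA (none, [], [])
  (st.2.1, st.2.2)

-- ===== PORT B =====
-- _section_lines: generic extractor of the stripped data lines under section `target`
def pvSecStep (target : String) (st : Option String × List String) (line : String) :
    Option String × List String :=
  let s := PySem.Str.strip line
  if s = "" ∨ PySem.Str.startswith s ";" then st
  else if PySem.Str.startswith s "[" then
    (some (PySem.Str.lower (PySem.Str.stripChars s "[] \t")), st.2)
  else if st.1 = some target then (st.1, st.2 ++ [s])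
  else st

def pvSectionLines (lines : List String) (target : String) : List String :=
  (lines.foldl (pvSecStep target) (none, [])).2

-- the two comprehensions (guard + map = filterMap)
def pvParseAtom (l : String) : Option (Int × Int × String × String) :=
  let p := PySem.Str.split₀ l
  if 5 ≤ p.length then
    some ((PySem.Int.ofStr? (p.getD 0 "")).getD 0,
          (PySem.Int.ofStr? (p.getD 2 "")).getD 0, p.getD 3 "", p.getD 4 "")
  else none

def pvParseBond (l : String) : Option (Int × Int) :=
  let p := PySem.Str.split₀ l
  if 2 ≤ p.length then
    some ((PySem.Int.ofStr? (p.getD 0 "")).getD 0,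
          (PySem.Int.ofStr? (p.getD 1 "")).getD 0)
  else none

def parse_itp_alt (itp_text : String) :
    (List (Int × Int × String × String)) × (List (Int × Int)) :=
  let lines := PySem.Str.splitlines itp_text
  ((pvSectionLines lines "atoms").filterMap pvParseAtom,
   (pvSectionLines lines "bonds").filterMap pvParseBond)

-- ===== PRECONDITION & SPEC =====
-- Pre_ excludes exactly the inputs where Python's int() raises ValueError (in both A
-- and B): a data line under section 'atoms' with ≥5 fields whose field 0 or 2 is not
-- an int literal, or one under 'bonds' with ≥2 fields whose field 0 or 1 is not.
-- pvLinesOk only assigns each data line its section (last preceding header) and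
-- checks the int-literal condition; it computes neither program's output.
def pvIntOk (w : String) : Bool := (PySem.Int.ofStr? w).isSome

def pvLinesOk : List String → Option String → Bool
  | [], _ => true
  | line :: rest, sec =>
    let s := PySem.Str.strip line
    if s = "" ∨ PySem.Str.startswith s ";" then pvLinesOk rest sec
    else if PySem.Str.startswith s "[" then
      pvLinesOk rest (some (PySem.Str.lower (PySem.Str.stripChars s "[] \t")))
    else
      (if sec = some "atoms" then
         (let p := PySem.Str.split₀ s
          decide (p.length < 5) || (pvIntOk (p.getD 0 "") && pvIntOk (p.getD 2 "")))
       else if sec = some "bonds" then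
         (let p := PySem.Str.split₀ s
          decide (p.length < 2) || (pvIntOk (p.getD 0 "") && pvIntOk (p.getD 1 "")))
       else true) && pvLinesOk rest sec

def Pre_parse_itp (itp_text : String) : Prop :=
  pvLinesOk (PySem.Str.splitlines itp_text) none = true
instance (itp_text : String) : Decidable (Pre_parse_itp itp_text) := by
  unfold Pre_parse_itp; infer_instance

def pvWitness_parse_itp : String :=
  "[ atoms ]\n1 CA 2 RES NM ; c\n\n[ bonds ]\n1 2 1"

def Spec_parse_itp (itp_text : String)
    (out : (List (Int × Int × String × String)) × (List (Int × Int))) : Prop :=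
  out = parse_itp_alt itp_text
instance (itp_text : String)
    (out : (List (Int × Int × String × String)) × (List (Int × Int))) :
    Decidable (Spec_parse_itp itp_text out) := by unfold Spec_parse_itp; infer_instance

-- ===== CLAIM (what is proved, stated in full; the proofs are below) =====
def Claim_equal_parse_itp : Prop := ∀ (itp_text : String), Dom_parse_itp itp_text → Pre_parse_itp itp_text → Spec_parse_itp itp_text (parse_itp itp_text)

-- ===== LEMMAS AND PROOFS =====

-- accumulator lemma for the collector fold
theorem pvSecStep_acc (t : String) (lines : List String) :
    ∀ (sec : Option String) (u : List String),
      lines.foldl (pvSecStep t) (sec, u) =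
        ((lines.foldl (pvSecStep t) (sec, [])).1,
         u ++ (lines.foldl (pvSecStep t) (sec, [])).2) := by
  induction lines with
  | nil => intro sec u; simp
  | cons l rest ih =>
    intro sec u
    simp only [List.foldl_cons]
    by_cases h1 : PySem.Str.strip l = "" ∨ PySem.Str.startswith (PySem.Str.strip l) ";"
    · simp only [pvSecStep, if_pos h1]; exact ih sec u
    · by_cases h2 : PySem.Str.startswith (PySem.Str.strip l) "[" = true
      · simp only [pvSecStep, if_neg h1, if_pos h2]
        exact ih _ u
      · by_cases h3 : sec = some t
        · subst h3
          simp only [pvSecStep, if_neg h1, if_neg h2, if_true, List.nil_append]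
          rw [ih (some t) (u ++ [PySem.Str.strip l]), ih (some t) [PySem.Str.strip l]]
          simp
        · simp only [pvSecStep, if_neg h1, if_neg h2, if_neg h3]
          exact ih sec u

-- main invariant: A's combined fold computes B's two independent collections
theorem pvMain (lines : List String) :
    ∀ (sec : Option String) (a : List (Int × Int × String × String))
      (b : List (Int × Int)),
      lines.foldl pvStepA (sec, a, b) =
        ((lines.foldl (pvSecStep "atoms") (sec, [])).1,
         a ++ ((lines.foldl (pvSecStep "atoms") (sec, [])).2).filterMap pvParseAtom,
         b ++ ((lines.foldl (pvSecStep "bonds") (sec, [])).2).filterMap pvParseBond) := by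
  induction lines with
  | nil => intro sec a b; simp
  | cons l rest ih =>
    intro sec a b
    simp only [List.foldl_cons]
    by_cases h1 : PySem.Str.strip l = "" ∨ PySem.Str.startswith (PySem.Str.strip l) ";"
    · simp only [pvStepA, pvSecStep, if_pos h1]; exact ih sec a b
    · by_cases h2 : PySem.Str.startswith (PySem.Str.strip l) "[" = true
      · simp only [pvStepA, pvSecStep, if_neg h1, if_pos h2]
        exact ih _ a b
      · by_cases h3 : sec = some "atoms"
        · subst h3
          have hne : (some "atoms" : Option String) ≠ some "bonds" := by decide
          simp only [pvStepA, pvSecStep, if_neg h1, if_neg h2, if_true, if_neg hne,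
            List.nil_append]
          rw [pvSecStep_acc "atoms" rest (some "atoms") [PySem.Str.strip l]]
          by_cases h5 : 5 ≤ (PySem.Str.split₀ (PySem.Str.strip l)).length
          · simp only [if_pos h5]
            rw [ih (some "atoms") _ b]
            simp [pvParseAtom, h5]
          · simp only [if_neg h5]
            rw [ih (some "atoms") a b]
            simp [pvParseAtom, h5]
        · by_cases h4 : sec = some "bonds"
          · subst h4
            have hne : (some "bonds" : Option String) ≠ some "atoms" := by decide
            simp only [pvStepA, pvSecStep, if_neg h1, if_neg h2, if_true, if_neg hne,
              List.nil_append]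
            rw [pvSecStep_acc "bonds" rest (some "bonds") [PySem.Str.strip l]]
            by_cases h5 : 2 ≤ (PySem.Str.split₀ (PySem.Str.strip l)).length
            · simp only [if_pos h5]
              rw [ih (some "bonds") a _]
              simp [pvParseBond, h5]
            · simp only [if_neg h5]
              rw [ih (some "bonds") a b]
              simp [pvParseBond, h5]
          · simp only [pvStepA, pvSecStep, if_neg h1, if_neg h2, if_neg h3, if_neg h4]
            exact ih sec a b

-- ===== VERDICT (by name: the statement is the Claim_ definition above) =====
theorem parse_itp_spec : Claim_equal_parse_itp := by
  intro itp_text _ _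
  unfold Spec_parse_itp
  simp only [parse_itp, parse_itp_alt, pvSectionLines,
    pvMain (PySem.Str.splitlines itp_text) none [] [], List.nil_append]
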